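-- pv_equiv track=rewrite | github.com/mugdhajha/Resumind | backend/services/matcher.py | compute_skill_gap
-- ===== SOURCE A (Python) =====
-- from typing import Any, List, Tuple
--
-- def compute_skill_gap(
--     resume_skills: List[str],
--     job_skills: List[str],
-- ) -> Tuple[List[str], List[str]]:
--     """
--     Compute matching and missing skills.
--
--     Args:
--         resume_skills: Skills extracted from the resume.
--         job_skills:    Skills extracted from the job description.
--
--     Returns:
--         (matching_skills, missing_skills)
--     """
--     resume_set = {s.lower() for s in resume_skills}
--     job_set = {s.lower() for s in job_skills}
--
--     matching_lower = resume_set & job_set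
--     missing_lower = job_set - resume_set
--
--     # Rebuild with original casing from job_skills list
--     job_map = {s.lower(): s for s in job_skills}
--
--     matching = sorted([job_map[s] for s in matching_lower if s in job_map])
--     missing = sorted([job_map[s] for s in missing_lower if s in job_map])
--
--     return matching, missing
-- ===== SOURCE B (Python) =====
-- def compute_skill_gap(resume_skills, job_skills):
--     """Sort-and-group instead of hash sets: sort the job skills by
--     (lowercase key, position), collapse each run of equal keys to its
--     last (latest-occurring) entry, then split the collapsed runs by
--     binary search in the sorted lowered resume list.  The position
--     component breaks all ties, so the sort never compares the original
--     strings."""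
--     jobs = sorted((s.lower(), i, s) for i, s in enumerate(job_skills))
--     runs = []  # one (lowercase, original) pair per distinct lowercase key
--     for low, _, s in jobs:
--         if runs and runs[-1][0] == low:
--             runs[-1] = (low, s)
--         else:
--             runs.append((low, s))
--     lows = sorted(s.lower() for s in resume_skills)
--
--     def has(x):
--         lo, hi = 0, len(lows)
--         while lo < hi:
--             mid = (lo + hi) // 2
--             if lows[mid] < x:
--                 lo = mid + 1
--             else:
--                 hi = mid
--         return lo < len(lows) and lows[lo] == x
--
--     matching = sorted(s for low, s in runs if has(low))
--     missing = sorted(s for low, s in runs if not has(low))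
--     return matching, missing
-- ===== Notes on version B (the rewrite author's own statement) =====
-- stated objective: alternative
-- what changed: Replaces A's hash-based set algebra (lowercased set intersection/difference plus a lowercase-to-casing remap dict) with a sort-and-group algorithm: job skills are sorted by (lowercase, position), runs of equal lowercase keys are collapsed to their last entry in one linear scan, and the collapsed runs are split by hand-written binary search in the sorted lowered resume list.
import Mathlib
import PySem

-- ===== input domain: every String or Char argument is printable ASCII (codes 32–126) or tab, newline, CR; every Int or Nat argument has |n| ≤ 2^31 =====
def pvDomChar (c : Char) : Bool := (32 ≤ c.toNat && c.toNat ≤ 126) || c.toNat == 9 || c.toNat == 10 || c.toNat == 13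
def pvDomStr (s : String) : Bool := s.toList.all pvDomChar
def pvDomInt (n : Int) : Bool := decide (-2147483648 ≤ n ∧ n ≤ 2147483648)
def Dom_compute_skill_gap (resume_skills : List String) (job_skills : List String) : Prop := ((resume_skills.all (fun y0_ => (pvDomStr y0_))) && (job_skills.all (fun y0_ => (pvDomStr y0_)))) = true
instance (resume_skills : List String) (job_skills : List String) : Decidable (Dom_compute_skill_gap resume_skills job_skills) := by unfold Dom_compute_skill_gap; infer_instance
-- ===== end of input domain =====

-- B replaces A's hash-set algebra plus lowercase→casing remap dict by a sort-and-group
-- algorithm (sort job skills by (lowercase, position), collapse runs, split the runs);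
-- objective: alternative algorithm, same results.

-- ===== PORT A =====
-- Literal port of A: sets of lowercased skills, set algebra, then a remap through job_map.
-- '[job_map[s] for s in X if s in job_map]' is the filterMap ('s in job_map' guard, then lookup);
-- the comprehensions iterate Python sets, but their results are only consumed by key-less sorted,
-- which is independent of the iteration order, so the PySem.Set order is exact here.
def compute_skill_gap (resume_skills : List String) (job_skills : List String) : List String × List String :=
  let resume_set : PySem.Set String := PySem.Set.ofList (resume_skills.map (fun s => PySem.Str.lower s))
  let job_set : PySem.Set String := PySem.Set.ofList (job_skills.map (fun s => PySem.Str.lower s))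
  let matching_lower := PySem.Set.inter resume_set job_set
  let missing_lower := PySem.Set.diff job_set resume_set
  let job_map : PySem.Dict String String := PySem.Dict.ofList (job_skills.map (fun s => (PySem.Str.lower s, s)))
  let matching := PySem.List.sorted (matching_lower.filterMap (fun s => if job_map.contains s then job_map.get? s else none)) (fun x => x) false
  let missing := PySem.List.sorted (missing_lower.filterMap (fun s => if job_map.contains s then job_map.get? s else none)) (fun x => x) false
  (matching, missing)

-- ===== PORT B =====
-- B-side helpers: the hand-written binary search of Source B, ported step for step
-- (lo, hi, mid are Python ints; lows[mid] is in range whenever the loop reads it,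
-- ported with pyGetD; '(lo + hi) // 2' is PySem.Int.floordiv — exact).
def pvBisect (lows : List String) (x : String) (lo hi : Int) : Int :=
  if h : lo < hi then
    if PySem.List.pyGetD lows (PySem.Int.floordiv (lo + hi) 2) "" < x then
      pvBisect lows x (PySem.Int.floordiv (lo + hi) 2 + 1) hi
    else pvBisect lows x lo (PySem.Int.floordiv (lo + hi) 2)
  else lo
termination_by (hi - lo).toNat
decreasing_by
  · have hb := PySem.Int.floordiv_two_mid_bounds (le_of_lt h)
    omega
  · have hb := PySem.Int.floordiv_two_mid_bounds (le_of_lt h)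
    have h1 : PySem.Int.floordiv (lo + hi) 2 < hi := by
      rw [PySem.Int.floordiv_lt_iff_lt_mul (by norm_num)]
      omega
    omega

-- Source B's 'has': 'lo < len(lows) and lows[lo] == x' (short-circuit guards the access)
def pvHas (lows : List String) (x : String) : Bool :=
  decide (pvBisect lows x 0 (lows.length : Int) < (lows.length : Int)) &&
    (PySem.List.pyGetD lows (pvBisect lows x 0 (lows.length : Int)) "" == x)

-- Literal port of B (Source B): sort the (lowercase, index, original) triples — the index breaks
-- every tie, so Python's tuple sort never reaches the third component and keys on (low, i),
-- which is what sorted2 does — then collapse runs of equal lowercase keys keeping the last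
-- entry (the accumulator is kept reversed, head = runs[-1], and reversed back at the end),
-- and finally split the runs by binary search in the sorted lowered resume list.
def compute_skill_gap_alt (resume_skills : List String) (job_skills : List String) : List String × List String :=
  let jobs := PySem.List.sorted2
    ((PySem.List.enumerate job_skills).map (fun p => (PySem.Str.lower p.2, p.1, p.2)))
    (fun t => t.1) (fun t => t.2.1) false
  let runs := (jobs.foldl (fun (acc : List (String × String)) t =>
      match acc with
      | [] => [(t.1, t.2.2)]
      | (l0, s0) :: rest =>
        if l0 == t.1 then (t.1, t.2.2) :: rest else (t.1, t.2.2) :: (l0, s0) :: rest) []).reverse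
  let lows := PySem.List.sorted (resume_skills.map (fun s => PySem.Str.lower s)) (fun x => x) false
  let matching := PySem.List.sorted ((runs.filter (fun p => pvHas lows p.1)).map (fun p => p.2)) (fun x => x) false
  let missing := PySem.List.sorted ((runs.filter (fun p => !pvHas lows p.1)).map (fun p => p.2)) (fun x => x) false
  (matching, missing)

-- ===== PRECONDITION & SPEC =====
def Spec_compute_skill_gap (resume_skills : List String) (job_skills : List String) (out : List String × List String) : Prop := out = compute_skill_gap_alt resume_skills job_skills
instance (resume_skills : List String) (job_skills : List String) (out : List String × List String) : Decidable (Spec_compute_skill_gap resume_skills job_skills out) := by unfold Spec_compute_skill_gap; infer_instance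

-- ===== CLAIM (what is proved, stated in full; the proofs are below) =====
def Claim_equal_compute_skill_gap : Prop := ∀ (resume_skills : List String) (job_skills : List String), Dom_compute_skill_gap resume_skills job_skills → Spec_compute_skill_gap resume_skills job_skills (compute_skill_gap resume_skills job_skills)

-- ===== LEMMAS AND PROOFS =====

-- ---- A-side characterisation ----

-- find? over an append: first list wins.
lemma pv_find?_append {α : Type} (a b : List α) (q : α → Bool) :
    (a ++ b).find? q = ((a.find? q).or (b.find? q)) := by
  induction a with
  | nil => simp
  | cons x t ih =>
    by_cases h : q x = true <;> simp [h, ih]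

-- lookup in an insertion fold: the LAST occurrence of the key wins.
lemma pv_getD_fold_ins (l : List String) (d : PySem.Dict String String) (k : String) :
    (l.foldl (fun d s => d.insert (PySem.Str.lower s) s) d).getD k ""
      = (l.reverse.find? (fun s => PySem.Str.lower s == k)).getD (d.getD k "") := by
  induction l generalizing d with
  | nil => simp
  | cons s t ih =>
    rw [List.foldl_cons, ih, List.reverse_cons, pv_find?_append]
    cases t.reverse.find? (fun s => PySem.Str.lower s == k) with
    | some v => rfl
    | none =>
      simp only [Option.none_or, List.find?_cons, List.find?_nil]
      by_cases h : PySem.Str.lower s = k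
      · rw [PySem.Dict.getD_insert]
        simp [h]
      · have hb : (PySem.Str.lower s == k) = false := by simp [h]
        have hne : k ≠ PySem.Str.lower s := fun hk => h hk.symm
        rw [PySem.Dict.getD_insert]
        simp [hb, hne]

-- A's job_map is the same insertion fold over job_skills.
lemma pv_job_map_eq (js : List String) :
    PySem.Dict.ofList (js.map (fun s => (PySem.Str.lower s, s)))
      = js.foldl (fun d s => d.insert (PySem.Str.lower s) s) PySem.Dict.empty := by
  show (js.map (fun s => (PySem.Str.lower s, s))).foldl
      (fun d p => d.insert p.1 p.2) PySem.Dict.empty = _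
  rw [List.foldl_map]

-- keys of an insertion fold from empty.
lemma pv_keys_fold_ins (l : List String) :
    (l.foldl (fun d s => d.insert (PySem.Str.lower s) s) PySem.Dict.empty).keys
      = PySem.Set.ofList (l.map (fun s => PySem.Str.lower s)) := by
  rw [PySem.Dict.keys_foldl_insert_key l (fun s => PySem.Str.lower s) (fun _ s => s)]
  simp [PySem.Dict.keys_empty, PySem.Set.update_nil_left]

-- the guarded comprehension over keys that are all present is a plain map of getD.
lemma pv_filterMap_eq_map (S : List String) (d : PySem.Dict String String)
    (h : ∀ k ∈ S, d.contains k = true) :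
    S.filterMap (fun s => if d.contains s then d.get? s else none)
      = S.map (fun k => d.getD k "") := by
  induction S with
  | nil => rfl
  | cons k t ih =>
    have hk := h k (by simp)
    have hsome : (d.get? k).isSome := by rw [← PySem.Dict.contains_eq_isSome_get?]; exact hk
    cases hv : d.get? k with
    | none => rw [hv] at hsome; simp at hsome
    | some v =>
      rw [List.filterMap_cons, List.map_cons, ih (fun x hx => h x (by simp [hx]))]
      have hg : d.getD k "" = v := by rw [PySem.Dict.getD_eq_get?_getD, hv]; rfl
      simp [hk, hv, hg]

-- ---- B-side: the lexicographic comparison used by sorted2 on the triples ----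

def pvLt (a b : String × Int × String) : Bool :=
  decide (a.1 < b.1) || (!decide (b.1 < a.1) && decide (a.2.1 < b.2.1))

lemma pv_lt_iff (a b : String × Int × String) :
    pvLt a b = true ↔ (a.1 < b.1 ∨ (¬ b.1 < a.1 ∧ a.2.1 < b.2.1)) := by
  simp [pvLt]

lemma pv_lt_le {a b : String × Int × String} (h : pvLt a b = true) : a.1 ≤ b.1 := by
  rcases (pv_lt_iff a b).1 h with h1 | ⟨h1, _⟩
  · exact le_of_lt h1
  · exact le_of_not_gt h1

lemma pv_lt_idx {a b : String × Int × String} (h : pvLt a b = true) (he : a.1 = b.1) :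
    a.2.1 < b.2.1 := by
  rcases (pv_lt_iff a b).1 h with h1 | ⟨_, h2⟩
  · exact absurd h1 (by rw [he]; exact lt_irrefl _)
  · exact h2

lemma pv_lt_trans (a b c : String × Int × String)
    (hab : pvLt a b = true) (hbc : pvLt b c = true) : pvLt a c = true := by
  rw [pv_lt_iff] at hab hbc ⊢
  rcases hab with h1 | ⟨h1, h1'⟩ <;> rcases hbc with h2 | ⟨h2, h2'⟩
  · exact Or.inl (lt_trans h1 h2)
  · exact Or.inl (lt_of_lt_of_le h1 (le_of_not_gt h2))
  · exact Or.inl (lt_of_le_of_lt (le_of_not_gt h1) h2)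
  · exact Or.inr ⟨fun hca => h1 (lt_of_le_of_lt (le_of_not_gt h2) hca), lt_trans h1' h2'⟩

-- ---- generic insertion-sort (insertBy fold) facts ----

lemma pv_insertBy_perm {α : Type} (lt : α → α → Bool) (x : α) (ys : List α) :
    (PySem.List.insertBy lt x ys).Perm (x :: ys) := by
  induction ys with
  | nil => simp [PySem.List.insertBy]
  | cons y t ih =>
    by_cases h : lt x y = true
    · simp [PySem.List.insertBy, h]
    · simp only [PySem.List.insertBy, h]
      exact (ih.cons y).trans (List.Perm.swap x y t)

lemma pv_insertBy_pairwise {α : Type} (lt : α → α → Bool)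
    (htrans : ∀ a b c, lt a b = true → lt b c = true → lt a c = true)
    (x : α) (ys : List α) (h : ys.Pairwise (fun a b => lt a b = true))
    (hc : ∀ y ∈ ys, lt x y = true ∨ lt y x = true) :
    (PySem.List.insertBy lt x ys).Pairwise (fun a b => lt a b = true) := by
  induction ys with
  | nil => simp [PySem.List.insertBy]
  | cons y t ih =>
    rcases List.pairwise_cons.1 h with ⟨hy, ht⟩
    by_cases hxy : lt x y = true
    · simp only [PySem.List.insertBy, hxy, if_true]
      refine List.pairwise_cons.2 ⟨?_, h⟩
      intro z hz
      rcases List.mem_cons.1 hz with rfl | hz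
      · exact hxy
      · exact htrans _ _ _ hxy (hy z hz)
    · simp only [PySem.List.insertBy, hxy]
      refine List.pairwise_cons.2 ⟨?_, ih ht (fun z hz => hc z (List.mem_cons_of_mem _ hz))⟩
      intro z hz
      rcases (PySem.List.mem_insertBy _ _ _ _).1 hz with rfl | hz
      · rcases hc y List.mem_cons_self with hcy | hcy
        · exact absurd hcy hxy
        · exact hcy
      · exact hy z hz

lemma pv_foldl_insertBy_perm {α : Type} (lt : α → α → Bool) (l : List α) (acc : List α) :
    (l.foldl (fun acc x => PySem.List.insertBy lt x acc) acc).Perm (acc ++ l) := by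
  induction l generalizing acc with
  | nil => simp
  | cons x t ih =>
    refine (ih (PySem.List.insertBy lt x acc)).trans ?_
    refine (List.Perm.append_right t (pv_insertBy_perm lt x acc)).trans ?_
    exact (List.perm_middle).symm

lemma pv_foldl_insertBy_pairwise {α : Type} (lt : α → α → Bool)
    (htrans : ∀ a b c, lt a b = true → lt b c = true → lt a c = true)
    (l : List α) (acc : List α)
    (hacc : acc.Pairwise (fun a b => lt a b = true))
    (hx : ∀ x ∈ l, ∀ a ∈ acc, lt x a = true ∨ lt a x = true)
    (hl : l.Pairwise (fun a b => lt a b = true ∨ lt b a = true)) :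
    (l.foldl (fun acc x => PySem.List.insertBy lt x acc) acc).Pairwise (fun a b => lt a b = true) := by
  induction l generalizing acc with
  | nil => exact hacc
  | cons x t ih =>
    rcases List.pairwise_cons.1 hl with ⟨hxt, ht⟩
    refine ih (PySem.List.insertBy lt x acc)
      (pv_insertBy_pairwise lt htrans x acc hacc (fun a ha => hx x List.mem_cons_self a ha)) ?_ ht
    intro y hy a ha
    rcases (PySem.List.mem_insertBy _ _ _ _).1 ha with rfl | ha
    · rcases hxt y hy with h | h
      · exact Or.inr h
      · exact Or.inl h
    · exact hx y (List.mem_cons_of_mem _ hy) a ha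

-- ---- the triples and the sorted job list ----

def pvTriples (js : List String) : List (String × Int × String) :=
  (PySem.List.enumerate js).map (fun p => (PySem.Str.lower p.2, p.1, p.2))

def pvJobs (js : List String) : List (String × Int × String) :=
  PySem.List.sorted2 (pvTriples js) (fun t => t.1) (fun t => t.2.1) false

lemma pv_sorted2_eq (xs : List (String × Int × String)) :
    PySem.List.sorted2 xs (fun t => t.1) (fun t => t.2.1) false
      = xs.foldl (fun acc x => PySem.List.insertBy pvLt x acc) [] := rfl

lemma pv_triples_fst (js : List String) :
    (pvTriples js).map (fun t => t.1) = js.map (fun s => PySem.Str.lower s) := by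
  unfold pvTriples
  rw [List.map_map]
  have : ((fun t : String × Int × String => t.1) ∘ (fun p : Int × String => (PySem.Str.lower p.2, p.1, p.2)))
      = (fun s => PySem.Str.lower s) ∘ (fun p : Int × String => p.2) := rfl
  rw [this, ← List.map_map, PySem.List.map_snd_enumerate]

lemma pv_triples_idx (js : List String) :
    (pvTriples js).Pairwise (fun a b => a.2.1 < b.2.1) := by
  unfold pvTriples
  exact (PySem.List.pairwise_lt_enumerate js 0).map _ (fun a b h => h)

lemma pv_triples_comp (js : List String) :
    (pvTriples js).Pairwise (fun a b => pvLt a b = true ∨ pvLt b a = true) := by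
  refine (pv_triples_idx js).imp ?_
  intro a b hab
  by_cases h1 : a.1 < b.1
  · exact Or.inl ((pv_lt_iff a b).2 (Or.inl h1))
  · by_cases h2 : b.1 < a.1
    · exact Or.inr ((pv_lt_iff b a).2 (Or.inl h2))
    · exact Or.inl ((pv_lt_iff a b).2 (Or.inr ⟨h2, hab⟩))

lemma pv_jobs_perm (js : List String) : (pvJobs js).Perm (pvTriples js) := by
  unfold pvJobs
  rw [pv_sorted2_eq]
  simpa using pv_foldl_insertBy_perm pvLt (pvTriples js) []

lemma pv_jobs_pairwise (js : List String) :
    (pvJobs js).Pairwise (fun a b => pvLt a b = true) := by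
  unfold pvJobs
  rw [pv_sorted2_eq]
  exact pv_foldl_insertBy_pairwise pvLt pv_lt_trans (pvTriples js) []
    (List.Pairwise.nil) (by intro x _ a ha; simp at ha) (pv_triples_comp js)

-- ---- collapsing runs of equal lowercase keys (keep the last of each run) ----

def pvCollapse : List (String × Int × String) → List (String × String)
  | [] => []
  | [a] => [(a.1, a.2.2)]
  | a :: b :: t => if a.1 = b.1 then pvCollapse (b :: t) else (a.1, a.2.2) :: pvCollapse (b :: t)

lemma pv_collapse_pos (a b : String × Int × String) (t : List (String × Int × String))
    (h : a.1 = b.1) : pvCollapse (a :: b :: t) = pvCollapse (b :: t) := by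
  rw [pvCollapse, if_pos h]

lemma pv_collapse_neg (a b : String × Int × String) (t : List (String × Int × String))
    (h : ¬ a.1 = b.1) : pvCollapse (a :: b :: t) = (a.1, a.2.2) :: pvCollapse (b :: t) := by
  rw [pvCollapse, if_neg h]

-- the head's index component is irrelevant to pvCollapse
lemma pv_collapse_mid (k : String) (i j : Int) (v : String) (t : List (String × Int × String)) :
    pvCollapse ((k, i, v) :: t) = pvCollapse ((k, j, v) :: t) := by
  cases t with
  | nil => simp [pvCollapse]
  | cons x t' =>
    by_cases h : k = x.1
    · rw [pv_collapse_pos _ _ _ h, pv_collapse_pos _ _ _ h]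
    · rw [pv_collapse_neg _ _ _ h, pv_collapse_neg _ _ _ h]

-- B's fold (reversed accumulator) computes pvCollapse
lemma pv_fold_step (L : List (String × Int × String)) :
    ∀ (l s : String) (racc : List (String × String)),
    L.foldl (fun (acc : List (String × String)) t =>
      match acc with
      | [] => [(t.1, t.2.2)]
      | (l0, s0) :: rest =>
        if l0 == t.1 then (t.1, t.2.2) :: rest else (t.1, t.2.2) :: (l0, s0) :: rest)
      ((l, s) :: racc)
      = (pvCollapse ((l, 0, s) :: L)).reverse ++ racc := by
  induction L with
  | nil => intro l s racc; simp [pvCollapse]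
  | cons x t ih =>
    intro l s racc
    have hx : pvCollapse (x :: t) = pvCollapse ((x.1, 0, x.2.2) :: t) := by
      calc pvCollapse (x :: t) = pvCollapse ((x.1, x.2.1, x.2.2) :: t) := by rfl
        _ = pvCollapse ((x.1, 0, x.2.2) :: t) := pv_collapse_mid _ _ _ _ _
    by_cases h : l = x.1
    · simp only [List.foldl_cons]
      rw [if_pos (show (l == x.1) = true by simp [h]), ih x.1 x.2.2 racc,
        pv_collapse_pos _ _ _ h, hx]
    · simp only [List.foldl_cons]
      rw [if_neg (show ¬ (l == x.1) = true by simp [h]), ih x.1 x.2.2 ((l, s) :: racc),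
        pv_collapse_neg _ _ _ h, hx]
      simp

lemma pv_runs_eq (L : List (String × Int × String)) :
    (L.foldl (fun (acc : List (String × String)) t =>
      match acc with
      | [] => [(t.1, t.2.2)]
      | (l0, s0) :: rest =>
        if l0 == t.1 then (t.1, t.2.2) :: rest else (t.1, t.2.2) :: (l0, s0) :: rest) []).reverse
      = pvCollapse L := by
  cases L with
  | nil => rfl
  | cons a t =>
    rw [List.foldl_cons]
    show (t.foldl _ ((a.1, a.2.2) :: ([] : List (String × String)))).reverse = _
    rw [pv_fold_step t a.1 a.2.2 []]
    simp only [List.append_nil, List.reverse_reverse]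
    calc pvCollapse ((a.1, 0, a.2.2) :: t) = pvCollapse ((a.1, a.2.1, a.2.2) :: t) :=
          pv_collapse_mid _ _ _ _ _
      _ = pvCollapse (a :: t) := by rfl

-- fst-membership is preserved by pvCollapse
lemma pv_collapse_fst_mem (L : List (String × Int × String)) (k : String) :
    k ∈ (pvCollapse L).map (fun p => p.1) ↔ k ∈ L.map (fun t => t.1) := by
  induction L with
  | nil => simp [pvCollapse]
  | cons a t ih =>
    cases t with
    | nil => simp [pvCollapse]
    | cons b t' =>
      by_cases h : a.1 = b.1
      · rw [pv_collapse_pos _ _ _ h, ih]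
        simp only [List.map_cons, List.mem_cons]
        constructor
        · intro hm; exact Or.inr hm
        · rintro (rfl | hm)
          · exact Or.inl (by rw [h])
          · exact hm
      · rw [pv_collapse_neg _ _ _ h]
        simp only [List.map_cons, List.mem_cons] at ih ⊢
        rw [ih]

-- on a pvLt-sorted list, collapsed firsts are strictly increasing
lemma pv_collapse_pairwise (L : List (String × Int × String))
    (h : L.Pairwise (fun a b => pvLt a b = true)) :
    (pvCollapse L).Pairwise (fun p q => p.1 < q.1) := by
  induction L with
  | nil => simp [pvCollapse]
  | cons a t ih =>
    rcases List.pairwise_cons.1 h with ⟨ha, ht⟩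
    cases t with
    | nil => simp [pvCollapse]
    | cons b t' =>
      by_cases hab : a.1 = b.1
      · rw [pv_collapse_pos _ _ _ hab]
        exact ih ht
      · rw [pv_collapse_neg _ _ _ hab]
        refine List.pairwise_cons.2 ⟨?_, ih ht⟩
        intro q hq
        have hq1 : q.1 ∈ ((b :: t').map (fun t => t.1)) :=
          (pv_collapse_fst_mem (b :: t') q.1).1 (List.mem_map_of_mem hq)
        have halt : ∀ x ∈ b :: t', a.1 < x.1 := by
          intro x hx
          rcases List.mem_cons.1 hx with rfl | hx
          · exact lt_of_le_of_ne (pv_lt_le (ha x List.mem_cons_self)) hab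
          · have hb1 : a.1 < b.1 := lt_of_le_of_ne (pv_lt_le (ha b List.mem_cons_self)) hab
            have : b.1 ≤ x.1 := pv_lt_le ((List.pairwise_cons.1 ht).1 x hx)
            exact lt_of_lt_of_le hb1 this
        rcases List.mem_map.1 hq1 with ⟨x, hx, hx1⟩
        rw [← hx1]
        exact halt x hx

-- on a pvLt-sorted list, each collapsed pair carries the entry with the maximal index of its key
lemma pv_collapse_max (L : List (String × Int × String))
    (h : L.Pairwise (fun a b => pvLt a b = true)) :
    ∀ k v, (k, v) ∈ pvCollapse L →
      ∃ i, (k, i, v) ∈ L ∧ ∀ i' v', (k, i', v') ∈ L → i' ≤ i := by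
  induction L with
  | nil => simp [pvCollapse]
  | cons a t ih =>
    rcases List.pairwise_cons.1 h with ⟨ha, ht⟩
    cases t with
    | nil =>
      intro k v hm
      simp only [pvCollapse, List.mem_singleton] at hm
      have hk : k = a.1 := congrArg Prod.fst hm
      have hv : v = a.2.2 := congrArg Prod.snd hm
      refine ⟨a.2.1, ?_, ?_⟩
      · simp [hk, hv]
      · intro i' v' hm'
        simp only [List.mem_singleton] at hm'
        have : i' = a.2.1 := by
          have := congrArg (fun t : String × Int × String => t.2.1) hm'
          simpa using this
        omega
    | cons b t' =>
      by_cases hab : a.1 = b.1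
      · intro k v hm
        rw [pv_collapse_pos _ _ _ hab] at hm
        rcases ih ht k v hm with ⟨i, hmem, hmax⟩
        refine ⟨i, List.mem_cons_of_mem _ hmem, ?_⟩
        intro i' v' hm'
        rcases List.mem_cons.1 hm' with heq | hm'
        · -- the dropped head a has key k and a smaller index than the kept entry
          have hk : a.1 = k := by
            have := congrArg (fun t : String × Int × String => t.1) heq
            simpa using this.symm
          have hia : i' = a.2.1 := by
            have := congrArg (fun t : String × Int × String => t.2.1) heq
            simpa using this
          have hord : a.2.1 < i := by
            rcases List.mem_cons.1 hmem with heqb | hmem'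
            · have : a.2.1 < b.2.1 := pv_lt_idx (ha b List.mem_cons_self) hab
              rw [← heqb] at this
              exact this
            · have hQ : pvLt b (k, i, v) = true := (List.pairwise_cons.1 ht).1 _ hmem'
              have hb1 : b.1 = k := by
                have h1 : b.1 ≤ k := pv_lt_le hQ
                have h2 : a.1 ≤ b.1 := pv_lt_le (ha b List.mem_cons_self)
                rw [hk] at h2
                exact le_antisymm h1 h2
              have hbi : b.2.1 < i := pv_lt_idx hQ hb1
              have : a.2.1 < b.2.1 := pv_lt_idx (ha b List.mem_cons_self) hab
              omega
          omega
        · exact hmax i' v' hm'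
      · intro k v hm
        rw [pv_collapse_neg _ _ _ hab] at hm
        have halt : ∀ x ∈ b :: t', a.1 < x.1 := by
          intro x hx
          rcases List.mem_cons.1 hx with rfl | hx
          · exact lt_of_le_of_ne (pv_lt_le (ha x List.mem_cons_self)) hab
          · have hb1 : a.1 < b.1 := lt_of_le_of_ne (pv_lt_le (ha b List.mem_cons_self)) hab
            exact lt_of_lt_of_le hb1 (pv_lt_le ((List.pairwise_cons.1 ht).1 x hx))
        rcases List.mem_cons.1 hm with heq | hm
        · -- the kept pair is a itself; no other entry can have key a.1
          have hk : k = a.1 := congrArg Prod.fst heq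
          have hv : v = a.2.2 := congrArg Prod.snd heq
          refine ⟨a.2.1, by simp [hk, hv], ?_⟩
          intro i' v' hm'
          rcases List.mem_cons.1 hm' with heq' | hm'
          · have : i' = a.2.1 := by
              have := congrArg (fun t : String × Int × String => t.2.1) heq'
              simpa using this
            omega
          · exfalso
            have : a.1 < (k, i', v').1 := halt _ hm'
            rw [hk] at this
            exact lt_irrefl _ this
        · rcases ih ht k v hm with ⟨i, hmem, hmax⟩
          have hk' : k ∈ (b :: t').map (fun t => t.1) :=
            List.mem_map.2 ⟨(k, i, v), hmem, rfl⟩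
          refine ⟨i, List.mem_cons_of_mem _ hmem, ?_⟩
          intro i' v' hm'
          rcases List.mem_cons.1 hm' with heq' | hm'
          · exfalso
            have hka : k = a.1 := by
              have := congrArg (fun t : String × Int × String => t.1) heq'
              simpa using this
            rcases List.mem_map.1 hk' with ⟨x, hx, hx1⟩
            have := halt x hx
            rw [hx1, hka] at this
            exact lt_irrefl _ this
          · exact hmax i' v' hm'

-- ---- connecting the collapsed runs to A's job_map ----

lemma pv_triple_mem (js : List String) (k : String) (i : Int) (v : String) :
    (k, i, v) ∈ pvTriples js ↔
      ∃ (n : Nat) (hn : n < js.length), i = (n : Int) ∧ v = js[n] ∧ k = PySem.Str.lower v := by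
  unfold pvTriples
  constructor
  · intro hm
    rcases List.mem_map.1 hm with ⟨p, hp, hpe⟩
    rcases (PySem.List.mem_enumerate_iff _ _ _).1 hp with ⟨n, hn, rfl⟩
    refine ⟨n, hn, ?_, ?_, ?_⟩
    · have := congrArg (fun t : String × Int × String => t.2.1) hpe
      simpa using this.symm
    · have := congrArg (fun t : String × Int × String => t.2.2) hpe
      simpa using this.symm
    · have hv : v = js[n] := by
        have := congrArg (fun t : String × Int × String => t.2.2) hpe
        simpa using this.symm
      have := congrArg (fun t : String × Int × String => t.1) hpe
      simp at this
      rw [← this, hv]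
  · rintro ⟨n, hn, rfl, rfl, rfl⟩
    refine List.mem_map.2 ⟨((n : Int), js[n]), ?_, by simp⟩
    exact (PySem.List.mem_enumerate_iff _ _ _).2 ⟨n, hn, by simp⟩

lemma pv_find?_reverse_max {α : Type} (xs : List α) (p : α → Bool) (n : Nat)
    (hn : n < xs.length) (hp : p xs[n] = true)
    (hmax : ∀ m (hm : m < xs.length), p xs[m] = true → m ≤ n) :
    xs.reverse.find? p = some xs[n] := by
  have h1 : xs.reverse = (xs.drop (n + 1)).reverse ++ (xs.take (n + 1)).reverse := by
    conv_lhs => rw [← List.take_append_drop (n + 1) xs]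
    rw [List.reverse_append]
  rw [h1, pv_find?_append]
  have h2 : (xs.drop (n + 1)).reverse.find? p = none := by
    rw [List.find?_eq_none]
    intro x hx
    rw [List.mem_reverse] at hx
    rcases List.mem_iff_getElem.1 hx with ⟨j, hj, hxj⟩
    rw [List.getElem_drop] at hxj
    intro hpx
    have hlen : n + 1 + j < xs.length := by
      have := hj; simp [List.length_drop] at this; omega
    have := hmax (n + 1 + j) hlen (by rw [hxj]; exact hpx)
    omega
  have ht : xs.take (n + 1) = xs.take n ++ [xs[n]] := by
    rw [List.take_add_one, List.getElem?_eq_getElem hn]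
    rfl
  have h3 : (xs.take (n + 1)).reverse.find? p = some xs[n] := by
    rw [ht, List.reverse_append]
    simp only [List.reverse_cons, List.reverse_nil, List.nil_append, List.singleton_append]
    exact List.find?_cons_of_pos hp
  rw [h2, h3]
  rfl

lemma pv_collapse_value (js : List String) (k v : String)
    (hm : (k, v) ∈ pvCollapse (pvJobs js)) :
    (PySem.Dict.ofList (js.map (fun s => (PySem.Str.lower s, s)))).getD k "" = v := by
  rcases pv_collapse_max (pvJobs js) (pv_jobs_pairwise js) k v hm with ⟨i, hmem, hmax⟩
  have hperm := pv_jobs_perm js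
  have hmemT : (k, i, v) ∈ pvTriples js := hperm.mem_iff.1 hmem
  have hmaxT : ∀ i' v', (k, i', v') ∈ pvTriples js → i' ≤ i := by
    intro i' v' h'
    exact hmax i' v' (hperm.mem_iff.2 h')
  rcases (pv_triple_mem js k i v).1 hmemT with ⟨n, hn, hi, hv, hk⟩
  have hfind : js.reverse.find? (fun s => PySem.Str.lower s == k) = some js[n] := by
    apply pv_find?_reverse_max
    · rw [← hv, ← hk]; simp
    · intro m hm' hpm
      have : (k, (m : Int), js[m]) ∈ pvTriples js := by
        rw [pv_triple_mem]
        exact ⟨m, hm', rfl, rfl, by simpa using (eq_comm.1 (by simpa using hpm))⟩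
      have := hmaxT _ _ this
      omega
  rw [pv_job_map_eq, pv_getD_fold_ins, hfind]
  simp [← hv]

-- ---- correctness of the hand-written binary search ----

lemma pv_bisect_spec (lows : List String) (x : String)
    (hsor : lows.Pairwise (fun a b => a ≤ b)) :
    ∀ (n : Nat) (lo hi : Int), (hi - lo).toNat = n → 0 ≤ lo → lo ≤ hi → hi ≤ (lows.length : Int) →
      lo ≤ pvBisect lows x lo hi ∧ pvBisect lows x lo hi ≤ hi ∧
      (∀ (j : Nat) (hj : j < lows.length), lo ≤ (j : Int) → (j : Int) < pvBisect lows x lo hi → lows[j] < x) ∧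
      (∀ (j : Nat) (hj : j < lows.length), pvBisect lows x lo hi ≤ (j : Int) → (j : Int) < hi → ¬ lows[j] < x) := by
  have hmono : ∀ (p q : Nat) (hq : q < lows.length) (hpq : p ≤ q),
      lows[p]'(Nat.lt_of_le_of_lt hpq hq) ≤ lows[q] := by
    intro p q hq hpq
    rcases Nat.lt_or_eq_of_le hpq with hlt | heq
    · exact List.pairwise_iff_getElem.1 hsor p q (by omega) hq hlt
    · subst heq; exact le_refl _
  intro n
  induction n using Nat.strong_induction_on with
  | _ n ih =>
    intro lo hi hn h0 hlh hhl
    rw [pvBisect]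
    by_cases h : lo < hi
    · rw [dif_pos h]
      set mid := PySem.Int.floordiv (lo + hi) 2 with hmid
      have hb := PySem.Int.floordiv_two_mid_bounds hlh
      have hmlt : mid < hi := by
        rw [hmid, PySem.Int.floordiv_lt_iff_lt_mul (by norm_num)]
        omega
      have hmge : lo ≤ mid := hb.1
      have hmnn : 0 ≤ mid := le_trans h0 hmge
      have hmltlen : mid < (lows.length : Int) := lt_of_lt_of_le hmlt hhl
      have hmtn : mid.toNat < lows.length := by omega
      have hget : PySem.List.pyGetD lows mid "" = lows[mid.toNat] :=
        PySem.List.pyGetD_eq_getElem lows "" hmnn (by exact_mod_cast hmltlen)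
      rw [hget]
      by_cases hc : lows[mid.toNat] < x
      · rw [if_pos hc]
        rcases ih (hi - (mid + 1)).toNat (by omega) (mid + 1) hi rfl (by omega) (by omega) hhl
          with ⟨r1, r2, r3, r4⟩
        refine ⟨by omega, r2, ?_, r4⟩
        intro j hj hj1 hj2
        by_cases hjm : (j : Int) < mid + 1
        · have hle : lows[j] ≤ lows[mid.toNat] := hmono j mid.toNat hmtn (by omega)
          exact lt_of_le_of_lt hle hc
        · exact r3 j hj (by omega) hj2
      · rw [if_neg hc]
        rcases ih (mid - lo).toNat (by omega) lo mid rfl h0 hmge (le_of_lt hmltlen)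
          with ⟨r1, r2, r3, r4⟩
        refine ⟨r1, by omega, r3, ?_⟩
        intro j hj hj1 hj2
        by_cases hjm : (j : Int) < mid
        · exact r4 j hj hj1 hjm
        · intro hlt
          exact hc (lt_of_le_of_lt (hmono mid.toNat j hj (by omega)) hlt)
    · rw [dif_neg h]
      refine ⟨le_refl _, by omega, ?_, ?_⟩
      · intro j hj hj1 hj2
        exact absurd hj2 (by omega)
      · intro j hj hj1 hj2
        exact absurd hj2 (by omega)

lemma pv_has_iff (lows : List String) (x : String)
    (hsor : lows.Pairwise (fun a b => a ≤ b)) :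
    pvHas lows x = true ↔ x ∈ lows := by
  rcases pv_bisect_spec lows x hsor ((lows.length : Int) - 0).toNat 0 (lows.length : Int)
      rfl (le_refl 0) (by omega) (le_refl _) with ⟨r1, r2, r3, r4⟩
  set r := pvBisect lows x 0 (lows.length : Int) with hr
  constructor
  · intro h
    simp only [pvHas, ← hr, Bool.and_eq_true, decide_eq_true_eq, beq_iff_eq] at h
    rcases h with ⟨hlt, heq⟩
    have hget : PySem.List.pyGetD lows r "" = lows[r.toNat]'(by omega) :=
      PySem.List.pyGetD_eq_getElem lows "" (by omega) (by exact_mod_cast hlt)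
    rw [hget] at heq
    rw [← heq]
    exact List.getElem_mem _
  · intro hx
    rcases List.mem_iff_getElem.1 hx with ⟨j, hj, hje⟩
    have hjr : ¬ ((j : Int) < r) := by
      intro hlt
      have := r3 j hj (by omega) hlt
      rw [hje] at this
      exact lt_irrefl x this
    have hrlt : r < (lows.length : Int) := by omega
    have hrtn : r.toNat < lows.length := by omega
    have hnl : ¬ lows[r.toNat] < x := r4 r.toNat hrtn (by omega) (by exact_mod_cast hrtn)
    have hle : lows[r.toNat] ≤ lows[j] := by
      rcases Nat.lt_or_eq_of_le (show r.toNat ≤ j by omega) with hlt | heq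
      · exact List.pairwise_iff_getElem.1 hsor r.toNat j hrtn hj hlt
      · subst heq; exact le_refl _
    have heq : lows[r.toNat] = x := le_antisymm (hje ▸ hle) (not_lt.1 hnl)
    have hget : PySem.List.pyGetD lows r "" = lows[r.toNat] :=
      PySem.List.pyGetD_eq_getElem lows "" (by omega) (by exact_mod_cast hrlt)
    simp only [pvHas, ← hr, Bool.and_eq_true, decide_eq_true_eq, beq_iff_eq]
    exact ⟨hrlt, by rw [hget, heq]⟩

-- ---- one side of the output ----

lemma pv_side (js : List String) (S : List String) (q : String → Bool)
    (hS : S.Nodup)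
    (hmem : ∀ k, k ∈ S ↔ (k ∈ js.map (fun s => PySem.Str.lower s) ∧ q k = true)) :
    PySem.List.sorted
      (S.filterMap (fun s =>
        if (PySem.Dict.ofList (js.map (fun s => (PySem.Str.lower s, s)))).contains s
        then (PySem.Dict.ofList (js.map (fun s => (PySem.Str.lower s, s)))).get? s else none))
      (fun x => x) false
    = PySem.List.sorted
        (((pvCollapse (pvJobs js)).filter (fun p => q p.1)).map (fun p => p.2))
        (fun x => x) false := by
  set jm := PySem.Dict.ofList (js.map (fun s => (PySem.Str.lower s, s))) with hjm
  set M := pvCollapse (pvJobs js) with hM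
  have hjkeys : ∀ k, jm.contains k = true ↔ k ∈ js.map (fun s => PySem.Str.lower s) := by
    intro k
    rw [hjm, PySem.Dict.contains_iff_mem_keys, pv_job_map_eq, pv_keys_fold_ins,
      PySem.Set.mem_ofList]
  have hcont : ∀ k ∈ S, jm.contains k = true := by
    intro k hk
    exact (hjkeys k).2 ((hmem k).1 hk).1
  rw [pv_filterMap_eq_map S jm hcont]
  -- B's side: firsts of the collapsed runs are exactly the distinct lowered job skills
  have hMfst : ∀ k, k ∈ M.map (fun p => p.1) ↔ k ∈ js.map (fun s => PySem.Str.lower s) := by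
    intro k
    rw [hM, pv_collapse_fst_mem]
    constructor
    · intro h
      rcases List.mem_map.1 h with ⟨t, ht, rfl⟩
      have : t ∈ pvTriples js := (pv_jobs_perm js).mem_iff.1 ht
      rw [← pv_triples_fst js]
      exact List.mem_map_of_mem this
    · intro h
      rw [← pv_triples_fst js] at h
      rcases List.mem_map.1 h with ⟨t, ht, rfl⟩
      exact List.mem_map_of_mem ((pv_jobs_perm js).mem_iff.2 ht)
  have hval : ∀ p ∈ M, p.2 = jm.getD p.1 "" := by
    intro p hp
    have : (p.1, p.2) ∈ pvCollapse (pvJobs js) := by rw [← hM]; exact hp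
    exact (pv_collapse_value js p.1 p.2 this).symm
  have hpairM : M.Pairwise (fun p q => p.1 < q.1) := by
    rw [hM]; exact pv_collapse_pairwise (pvJobs js) (pv_jobs_pairwise js)
  set F := M.filter (fun p => q p.1) with hF
  have hBmap : F.map (fun p => p.2) = (F.map (fun p => p.1)).map (fun k => jm.getD k "") := by
    rw [List.map_map]
    exact List.map_congr_left (fun p hp => hval p (List.mem_of_mem_filter hp))
  have hFnodup : (F.map (fun p => p.1)).Nodup := by
    have h1 : F.Pairwise (fun p q => p.1 < q.1) := hpairM.filter _
    have h2 : (F.map (fun p => p.1)).Pairwise (· < ·) := List.pairwise_map.2 h1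
    exact h2.imp ne_of_lt
  have hmemF : ∀ k, k ∈ F.map (fun p => p.1) ↔ k ∈ S := by
    intro k
    constructor
    · intro h
      rcases List.mem_map.1 h with ⟨p, hpF, rfl⟩
      rcases List.mem_filter.1 hpF with ⟨hpM, hq⟩
      exact (hmem p.1).2 ⟨(hMfst p.1).1 (List.mem_map_of_mem hpM), hq⟩
    · intro hk
      rcases (hmem k).1 hk with ⟨hjs, hq⟩
      rcases List.mem_map.1 ((hMfst k).2 hjs) with ⟨p, hpM, rfl⟩
      exact List.mem_map_of_mem (List.mem_filter.2 ⟨hpM, hq⟩)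
  have hperm : (F.map (fun p => p.1)).Perm S := by
    rw [List.perm_ext_iff_of_nodup hFnodup hS]
    exact hmemF
  rw [hBmap]
  exact (PySem.List.sorted_eq_sorted_of_perm _ _ (fun x => x) (fun _ _ h => h)
    (hperm.map (fun k => jm.getD k ""))).symm

-- ===== VERDICT (by name: the statement is the Claim_ definition above) =====
theorem compute_skill_gap_spec : Claim_equal_compute_skill_gap := by
  intro rs js _
  show compute_skill_gap rs js = compute_skill_gap_alt rs js
  simp only [compute_skill_gap, compute_skill_gap_alt]
  rw [pv_runs_eq]
  have hrw : pvCollapse (PySem.List.sorted2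
      ((PySem.List.enumerate js).map (fun p => (PySem.Str.lower p.2, p.1, p.2)))
      (fun t => t.1) (fun t => t.2.1) false) = pvCollapse (pvJobs js) := rfl
  rw [hrw]
  refine Prod.ext ?_ ?_
  · refine pv_side js _ (fun k => pvHas
        (PySem.List.sorted (rs.map (fun s => PySem.Str.lower s)) (fun x => x) false) k)
      (PySem.Set.nodup_inter _ _ (PySem.Set.nodup_ofList _)) ?_
    intro k
    rw [PySem.Set.mem_inter, PySem.Set.mem_ofList, PySem.Set.mem_ofList,
      pv_has_iff _ _ (PySem.List.sorted_pairwise _ _), PySem.List.mem_sorted]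
    exact and_comm
  · refine pv_side js _ (fun k => !pvHas
        (PySem.List.sorted (rs.map (fun s => PySem.Str.lower s)) (fun x => x) false) k)
      (PySem.Set.nodup_diff _ _ (PySem.Set.nodup_ofList _)) ?_
    intro k
    rw [PySem.Set.mem_diff, PySem.Set.mem_ofList, PySem.Set.mem_ofList]
    have h := pv_has_iff (PySem.List.sorted (rs.map (fun s => PySem.Str.lower s)) (fun x => x) false) k
      (PySem.List.sorted_pairwise _ _)
    rw [PySem.List.mem_sorted] at h
    rw [show (!pvHas (PySem.List.sorted (rs.map (fun s => PySem.Str.lower s)) (fun x => x) false) k) = true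
        ↔ ¬ k ∈ rs.map (fun s => PySem.Str.lower s) by simp [← h]]
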